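-- pv_equiv track=rewrite | github.com/jlchenfzu/datc_robust_design_flow | benchmarks/utils/change_cell_names_ispd.py | change_pin_name
-- ===== SOURCE A (Python) =====
-- def extract_pin_and_net(token):
--     """ token should be .PIN(NET), or .PIN(NET) """
--
--     # replace ,.() with blank
--     for c in ('.', ',', '(', ')'):
--         token = token.replace(c, ' ')
--
--     token = token.strip().split()
--     pin, net = token[0], token[1]
--
--     return pin, net
--
-- def change_pin_name(pin_string, cell_name):
--     gate_type = cell_name.split("_")[0]
--
--     pins = list()
--
--     if gate_type == 'DFF':
--         for pin in pin_string:    # silly code..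
--             p, n = extract_pin_and_net(pin)
--             if p == 'd':
--                 pins.append(".D(%s)" % (n))
--             elif p == 'o':
--                 pins.append(".Q(%s)" % (n))
--             elif p == 'ck':
--                 pins.append(".CK(clk)")
--             else:
--                 # Skips the other pins
--                 continue
--
--     elif gate_type in ('AOI21', 'OAI21'):
--         for pin in pin_string:    # silly code..
--             p, n = extract_pin_and_net(pin)
--             if p == 'a':
--                 pins.append(".A(%s)" % (n))
--             elif p == 'b':
--                 pins.append(".B1(%s)" % (n))
--             elif p == 'c':
--                 pins.append(".B2(%s)" % (n))
--             elif p in ('o'):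
--                 pins.append(".ZN(%s)" % (n))
--             else:
--                 pins.append(pin.strip(','))
--
--     elif gate_type in ('AOI22', 'OAI22'):
--         for pin in pin_string:    # silly code..
--             p, n = extract_pin_and_net(pin)
--             if p == 'a':
--                 pins.append(".A1(%s)" % (n))
--             elif p == 'b':
--                 pins.append(".A2(%s)" % (n))
--             elif p == 'c':
--                 pins.append(".B1(%s)" % (n))
--             elif p == 'd':
--                 pins.append(".B2(%s)" % (n))
--             elif p in ('o'):
--                 pins.append(".ZN(%s)" % (n))
--             else:
--                 pins.append(pin.strip(','))
--
--     elif gate_type in ('INV'):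
--         for pin in pin_string:    # silly code..
--             p, n = extract_pin_and_net(pin)
--             if p == 'a':
--                 pins.append(".A(%s)" % (n))
--             elif p in ('o'):
--                 pins.append(".ZN(%s)" % (n))
--             else:
--                 pins.append(pin.strip(','))
--
--     else:
--         for pin in pin_string:    # silly code..
--             p, n = extract_pin_and_net(pin)
--             if p == 'a':
--                 pins.append(".A1(%s)" % (n))
--             elif p == 'b':
--                 pins.append(".A2(%s)" % (n))
--             elif p == 'c':
--                 pins.append(".A3(%s)" % (n))
--             elif p == 'd':
--                 pins.append(".A4(%s)" % (n))
--             elif p in ('o'):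
--                 pins.append(".ZN(%s)" % (n))
--             else:
--                 pins.append(pin.strip(','))
--
--     return pins
-- ===== SOURCE B (Python) =====
-- # Different algorithm: one-pass character scanner tokenizes each pin (instead of A's
-- # four replace passes + strip + split), the letter pins a..d are renamed by computed
-- # index into a per-gate name row (instead of chained comparisons), and the result is
-- # a filtered map over pin_string (each pin renamed independently, None = skipped).
--
-- _SEP = frozenset(' \t\n\r\x0b\x0c.,()')
--
-- def _tokens(s):
--     """Single left-to-right scan: maximal runs of characters outside _SEP."""
--     words, cur = [], []
--     for ch in s:
--         if ch in _SEP: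
--             if cur:
--                 words.append(''.join(cur))
--                 cur = []
--         else:
--             cur.append(ch)
--     if cur:
--         words.append(''.join(cur))
--     return words
--
-- def _rename(row, pin):
--     words = _tokens(pin)
--     p, n = words[0], words[1]
--     if row is None:                      # DFF: named pins, everything else skipped
--         if p == 'ck':
--             return '.CK(clk)'
--         if p == 'd':
--             return '.D(%s)' % n
--         if p == 'o':
--             return '.Q(%s)' % n
--         return None
--     if p == 'o':
--         return '.ZN(%s)' % n
--     k = ord(p) - ord('a') if len(p) == 1 else -1
--     if 0 <= k < len(row):
--         return '.%s(%s)' % (row[k], n)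
--     return pin.strip(',')
--
-- def change_pin_name(pin_string, cell_name):
--     gate_type = cell_name.split('_')[0]
--     if gate_type == 'DFF':
--         row = None
--     elif gate_type in ('AOI21', 'OAI21'):
--         row = ('A', 'B1', 'B2')
--     elif gate_type in ('AOI22', 'OAI22'):
--         row = ('A1', 'A2', 'B1', 'B2')
--     elif gate_type in 'INV':
--         row = ('A',)
--     else:
--         row = ('A1', 'A2', 'A3', 'A4')
--     renamed = (_rename(row, pin) for pin in pin_string)
--     return [r for r in renamed if r is not None]
-- ===== Notes on version B (the rewrite author's own statement) =====
-- stated objective: alternative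
-- what changed: A tokenizes each pin by four whole-string replace passes plus strip+split and renames pins through five copied per-gate if/elif loops; B tokenizes with a single left-to-right character scanner, renames the letter pins a..d by a computed index (ord(p)-ord('a')) into a per-gate name row, and builds the result as a filtered map over pin_string.
import Mathlib
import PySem

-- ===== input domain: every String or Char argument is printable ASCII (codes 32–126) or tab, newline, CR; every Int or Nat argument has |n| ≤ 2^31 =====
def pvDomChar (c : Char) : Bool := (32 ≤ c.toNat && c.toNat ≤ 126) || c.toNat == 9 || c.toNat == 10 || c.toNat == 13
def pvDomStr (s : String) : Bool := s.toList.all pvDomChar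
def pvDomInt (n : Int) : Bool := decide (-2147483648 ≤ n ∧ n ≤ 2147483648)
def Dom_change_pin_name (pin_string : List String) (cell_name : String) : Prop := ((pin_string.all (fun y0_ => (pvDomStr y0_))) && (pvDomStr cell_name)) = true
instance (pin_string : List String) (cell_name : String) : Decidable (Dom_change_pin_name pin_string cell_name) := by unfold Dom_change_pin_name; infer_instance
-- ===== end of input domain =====

-- B (objective: alternative): a one-pass character scanner tokenizes each pin instead of
-- A's four replace passes + strip + split, letter pins a..d are renamed by computed index
-- into a per-gate name row instead of chained comparisons, and the output is a filtered map.

-- gate_type = cell_name.split("_")[0] (the split is never empty, so the defaults never fire)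
def pvGateType (cell_name : String) : String :=
  ((PySem.Str.split? cell_name "_").getD []).headD ""

-- ===== PORT A =====
-- extract_pin_and_net: none exactly where Python's token[0]/token[1] raises IndexError
def extract_pin_and_net (token : String) : Option (String × String) :=
  match PySem.Str.split₀ (PySem.Str.strip
      ([".", ",", "(", ")"].foldl (fun t c => PySem.Str.replace t c " ") token)) with
  | p :: n :: _ => some (p, n)
  | _ => none

def change_pin_name (pin_string : List String) (cell_name : String) : List String :=
  let gate_type := pvGateType cell_name
  if gate_type = "DFF" then
    pin_string.foldl (fun pins pin =>
      match extract_pin_and_net pin with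
      | some (p, n) =>
        if p = "d" then pins ++ [".D(" ++ n ++ ")"]
        else if p = "o" then pins ++ [".Q(" ++ n ++ ")"]
        else if p = "ck" then pins ++ [".CK(clk)"]
        else pins
      | none => pins) []
  else if gate_type = "AOI21" ∨ gate_type = "OAI21" then
    pin_string.foldl (fun pins pin =>
      match extract_pin_and_net pin with
      | some (p, n) =>
        if p = "a" then pins ++ [".A(" ++ n ++ ")"]
        else if p = "b" then pins ++ [".B1(" ++ n ++ ")"]
        else if p = "c" then pins ++ [".B2(" ++ n ++ ")"]
        else if p = "o" then pins ++ [".ZN(" ++ n ++ ")"]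
        else pins ++ [PySem.Str.stripChars pin ","]
      | none => pins) []
  else if gate_type = "AOI22" ∨ gate_type = "OAI22" then
    pin_string.foldl (fun pins pin =>
      match extract_pin_and_net pin with
      | some (p, n) =>
        if p = "a" then pins ++ [".A1(" ++ n ++ ")"]
        else if p = "b" then pins ++ [".A2(" ++ n ++ ")"]
        else if p = "c" then pins ++ [".B1(" ++ n ++ ")"]
        else if p = "d" then pins ++ [".B2(" ++ n ++ ")"]
        else if p = "o" then pins ++ [".ZN(" ++ n ++ ")"]
        else pins ++ [PySem.Str.stripChars pin ","]
      | none => pins) []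
  else if PySem.Str.isIn gate_type "INV" then
    pin_string.foldl (fun pins pin =>
      match extract_pin_and_net pin with
      | some (p, n) =>
        if p = "a" then pins ++ [".A(" ++ n ++ ")"]
        else if p = "o" then pins ++ [".ZN(" ++ n ++ ")"]
        else pins ++ [PySem.Str.stripChars pin ","]
      | none => pins) []
  else
    pin_string.foldl (fun pins pin =>
      match extract_pin_and_net pin with
      | some (p, n) =>
        if p = "a" then pins ++ [".A1(" ++ n ++ ")"]
        else if p = "b" then pins ++ [".A2(" ++ n ++ ")"]
        else if p = "c" then pins ++ [".A3(" ++ n ++ ")"]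
        else if p = "d" then pins ++ [".A4(" ++ n ++ ")"]
        else if p = "o" then pins ++ [".ZN(" ++ n ++ ")"]
        else pins ++ [PySem.Str.stripChars pin ","]
      | none => pins) []

-- ===== PORT B =====
-- Source B's separator set _SEP = ' \t\n\r\x0b\x0c.,()'
def pvSep (c : Char) : Bool :=
  c == ' ' || c == '\t' || c == '\n' || c == '\r' || c == Char.ofNat 11 || c == Char.ofNat 12 ||
  c == '.' || c == ',' || c == '(' || c == ')'

-- _tokens: single scan collecting maximal runs of non-separator chars (words, cur)
def pvTokGo : List Char → List (List Char) → List Char → List (List Char)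
  | [], words, cur => if cur.isEmpty then words else words ++ [cur]
  | c :: rest, words, cur =>
    if pvSep c then
      if cur.isEmpty then pvTokGo rest words []
      else pvTokGo rest (words ++ [cur]) []
    else pvTokGo rest words (cur ++ [c])

def pvTokens (s : String) : List String := (pvTokGo s.toList [] []).map String.ofList

-- _rename: row = None for DFF, else the per-gate name row; the words[0]/words[1]
-- IndexError case (fewer than two tokens) is excluded by Pre_ and mapped to none
def pvRename (row : Option (List String)) (pin : String) : Option String :=
  match pvTokens pin with
  | p :: n :: _ =>
    match row with
    | none =>
      if p = "ck" then some ".CK(clk)"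
      else if p = "d" then some (".D(" ++ n ++ ")")
      else if p = "o" then some (".Q(" ++ n ++ ")")
      else none
    | some r =>
      if p = "o" then some (".ZN(" ++ n ++ ")")
      else
        let k : Int := if p.toList.length = 1 then ((p.toList.headD ' ').toNat : Int) - 97 else -1
        if 0 ≤ k ∧ k < (r.length : Int) then
          some ("." ++ ((PySem.List.pyGet? r k).getD "") ++ "(" ++ n ++ ")")
        else some (PySem.Str.stripChars pin ",")
  | _ => none

def change_pin_name_alt (pin_string : List String) (cell_name : String) : List String :=
  let gate_type := pvGateType cell_name
  let row : Option (List String) :=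
    if gate_type = "DFF" then none
    else if gate_type = "AOI21" ∨ gate_type = "OAI21" then some ["A", "B1", "B2"]
    else if gate_type = "AOI22" ∨ gate_type = "OAI22" then some ["A1", "A2", "B1", "B2"]
    else if PySem.Str.isIn gate_type "INV" then some ["A"]
    else some ["A1", "A2", "A3", "A4"]
  (pin_string.map (pvRename row)).filterMap id

-- ===== PRECONDITION & SPEC =====
-- the char substitution A's replace loop performs ('.' ',' '(' ')' → ' '), used by Pre_ and the lemmas
def pvClean (c : Char) : Char := if c = '.' ∨ c = ',' ∨ c = '(' ∨ c = ')' then ' ' else c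

-- Pre_ excludes exactly the inputs where Python (both A and B) raises IndexError: a pin token
-- that does not contain at least two words after '.', ',', '(', ')' and whitespace separation.
def Pre_change_pin_name (pin_string : List String) (cell_name : String) : Prop :=
  ∀ pin ∈ pin_string, 2 ≤ (PySem.Chars.split₀ (pin.toList.map pvClean)).length
instance (pin_string : List String) (cell_name : String) : Decidable (Pre_change_pin_name pin_string cell_name) := by unfold Pre_change_pin_name; infer_instance

def pvWitness_change_pin_name : List String × String := ([".d(n1),", ".ck(clk1),", ".e(w),"], "DFF_X1")

def Spec_change_pin_name (pin_string : List String) (cell_name : String) (out : List String) : Prop := out = change_pin_name_alt pin_string cell_name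
instance (pin_string : List String) (cell_name : String) (out : List String) : Decidable (Spec_change_pin_name pin_string cell_name out) := by unfold Spec_change_pin_name; infer_instance

-- ===== CLAIM (what is proved, stated in full; the proofs are below) =====
def Claim_equal_change_pin_name : Prop := ∀ (pin_string : List String) (cell_name : String), Dom_change_pin_name pin_string cell_name → Pre_change_pin_name pin_string cell_name → Spec_change_pin_name pin_string cell_name (change_pin_name pin_string cell_name)

-- ===== LEMMAS AND PROOFS =====

-- the cleaned pin string A splits: pvCleaned pin = pin with '.', ',', '(', ')' replaced by ' '
def pvCleaned (pin : String) : String :=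
  PySem.Str.replace (PySem.Str.replace (PySem.Str.replace (PySem.Str.replace pin "." " ") "," " ") "(" " ") ")" " "

-- Chars.replace with a single-char pattern is a map
theorem pv_replace_go_single (a b : Char) (fuel : Nat) :
    ∀ (l acc : List Char), l.length ≤ fuel →
    PySem.Chars.replace.go [a] [b] fuel l acc
      = acc.reverse ++ l.map (fun c => if c = a then b else c) := by
  induction fuel with
  | zero =>
    intro l acc h
    have : l = [] := List.eq_nil_of_length_eq_zero (Nat.le_zero.mp h)
    subst this; simp [PySem.Chars.replace.go]
  | succ m ih =>
    intro l acc h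
    match l with
    | [] => simp [PySem.Chars.replace.go]
    | c :: t =>
      by_cases hc : c = a
      · have hpre : [a].isPrefixOf (c :: t) = true := by simp [List.isPrefixOf, hc]
        simp only [PySem.Chars.replace.go, hpre, if_pos]
        rw [ih _ _ (by simpa using Nat.lt_succ_iff.mp (by simpa using h))]
        simp [hc]
      · have hpre : [a].isPrefixOf (c :: t) = false := by
          simp [List.isPrefixOf]; exact fun h' => hc h'.symm
        simp only [PySem.Chars.replace.go, hpre, Bool.false_eq_true, if_neg, not_false_iff]
        rw [ih _ _ (by simpa using Nat.lt_succ_iff.mp (by simpa using h))]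
        simp [hc]

theorem pv_replace_single (cs : List Char) (a b : Char) :
    PySem.Chars.replace cs [a] [b] = cs.map (fun c => if c = a then b else c) := by
  unfold PySem.Chars.replace
  simpa using pv_replace_go_single a b cs.length cs [] le_rfl

theorem pv_toList_cleaned (s : String) : (pvCleaned s).toList = s.toList.map pvClean := by
  simp only [pvCleaned, PySem.Str.replace]
  rw [show (".".toList) = ['.'] from rfl, show (",".toList) = [','] from rfl,
      show ("(".toList) = ['('] from rfl, show (")".toList) = [')'] from rfl,
      show (" ".toList) = [' '] from rfl]
  simp only [String.toList_ofList, pv_replace_single, List.map_map]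
  apply List.map_congr_left
  intro c _
  simp only [Function.comp, pvClean]
  by_cases h1 : c = '.' <;> by_cases h2 : c = ',' <;> by_cases h3 : c = '(' <;>
    by_cases h4 : c = ')' <;> simp_all

-- ===== A-side: split() ignores the strip() =====
theorem pv_go_spaces (u : List Char) (h : ∀ c ∈ u, PySem.Chars.isspace c = true)
    (cur : List Char) (acc : List (List Char)) :
    PySem.Chars.split₀.go u cur acc = PySem.Chars.split₀.go [] cur acc := by
  induction u generalizing cur acc with
  | nil => rfl
  | cons c rest ih =>
    have hc : PySem.Chars.isspace c = true := h c (by simp)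
    by_cases hcur : cur.isEmpty
    · simp [PySem.Chars.split₀.go, hc, hcur, ih (fun x hx => h x (by simp [hx]))]
    · simp [PySem.Chars.split₀.go, hc, hcur, ih (fun x hx => h x (by simp [hx]))]

theorem pv_go_append_spaces (t u : List Char) (h : ∀ c ∈ u, PySem.Chars.isspace c = true)
    (cur : List Char) (acc : List (List Char)) :
    PySem.Chars.split₀.go (t ++ u) cur acc = PySem.Chars.split₀.go t cur acc := by
  induction t generalizing cur acc with
  | nil => simpa using pv_go_spaces u h cur acc
  | cons c rest ih =>
    by_cases hc : PySem.Chars.isspace c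
    · by_cases hcur : cur.isEmpty
      · simp [PySem.Chars.split₀.go, hc, hcur, ih]
      · simp [PySem.Chars.split₀.go, hc, hcur, ih]
    · simp [PySem.Chars.split₀.go, hc, ih]

theorem pv_go_dropWhile (s : List Char) (acc : List (List Char)) :
    PySem.Chars.split₀.go (List.dropWhile PySem.Chars.isspace s) [] acc
      = PySem.Chars.split₀.go s [] acc := by
  induction s with
  | nil => rfl
  | cons c rest ih =>
    by_cases hc : PySem.Chars.isspace c
    · simp [List.dropWhile, hc, ih, PySem.Chars.split₀.go]
    · simp [List.dropWhile, hc]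

theorem pv_split₀_strip_chars (cs : List Char) :
    PySem.Chars.split₀ (PySem.Chars.strip cs) = PySem.Chars.split₀ cs := by
  unfold PySem.Chars.strip PySem.Chars.lstrip PySem.Chars.rstrip PySem.Chars.split₀
  set w := List.dropWhile PySem.Chars.isspace cs with hw
  have h1 : PySem.Chars.split₀.go w [] [] = PySem.Chars.split₀.go cs [] [] := pv_go_dropWhile cs []
  have hdecomp : (List.dropWhile PySem.Chars.isspace w.reverse).reverse
      ++ (List.takeWhile PySem.Chars.isspace w.reverse).reverse = w := by
    rw [← List.reverse_append, List.takeWhile_append_dropWhile, List.reverse_reverse]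
  calc PySem.Chars.split₀.go (List.dropWhile PySem.Chars.isspace w.reverse).reverse [] []
      = PySem.Chars.split₀.go ((List.dropWhile PySem.Chars.isspace w.reverse).reverse
          ++ (List.takeWhile PySem.Chars.isspace w.reverse).reverse) [] [] := by
        rw [pv_go_append_spaces _ _ (fun c hc => List.mem_takeWhile_imp (by simpa using hc))]
    _ = PySem.Chars.split₀.go cs [] [] := by rw [hdecomp, h1]

theorem pv_split₀_strip (s : String) :
    PySem.Str.split₀ (PySem.Str.strip s) = PySem.Str.split₀ s := by
  simp [PySem.Str.split₀, PySem.Str.toList_strip, pv_split₀_strip_chars]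

-- A's replace loop is the pvCleaned chain, and strip() before split() is a no-op
theorem pv_extract_eq (pin : String) :
    extract_pin_and_net pin =
      match PySem.Str.split₀ (pvCleaned pin) with
      | p :: n :: _ => some (p, n)
      | _ => none := by
  unfold extract_pin_and_net
  rw [show ([".", ",", "(", ")"].foldl (fun t c => PySem.Str.replace t c " ") pin) = pvCleaned pin by rfl]
  rw [pv_split₀_strip]

-- ===== B-side: the one-pass scanner equals split-after-clean on the input domain =====
theorem pvTokGo_acc (cs : List Char) :
    ∀ (words : List (List Char)) (cur : List Char),
    pvTokGo cs words cur = words ++ pvTokGo cs [] cur := by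
  induction cs with
  | nil => intro words cur; by_cases h : cur.isEmpty <;> simp [pvTokGo, h]
  | cons c rest ih =>
    intro words cur
    by_cases hs : pvSep c
    · by_cases h : cur.isEmpty
      · simp only [pvTokGo, hs, h, if_pos]
        exact ih words []
      · simp only [pvTokGo, hs, h, Bool.false_eq_true, if_pos, if_neg, not_false_iff,
          List.nil_append]
        rw [ih (words ++ [cur]) [], ih [cur] []]
        simp [List.append_assoc]
    · simp only [pvTokGo, hs, Bool.false_eq_true, if_neg, not_false_iff]
      exact ih words (cur ++ [c])

theorem pv_isspace_clean (c : Char) (hd : pvDomChar c = true) :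
    PySem.Chars.isspace (pvClean c) = pvSep c := by
  by_cases h1 : c = '.'
  · subst h1; decide
  · by_cases h2 : c = ','
    · subst h2; decide
    · by_cases h3 : c = '('
      · subst h3; decide
      · by_cases h4 : c = ')'
        · subst h4; decide
        · have hcl : pvClean c = c := by simp [pvClean, h1, h2, h3, h4]
          rw [hcl]
          have hn1 : c.toNat ≠ 46 := fun h => h1 (Char.ext (UInt32.toNat_inj.mp h))
          have hn2 : c.toNat ≠ 44 := fun h => h2 (Char.ext (UInt32.toNat_inj.mp h))
          have hn3 : c.toNat ≠ 40 := fun h => h3 (Char.ext (UInt32.toNat_inj.mp h))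
          have hn4 : c.toNat ≠ 41 := fun h => h4 (Char.ext (UInt32.toNat_inj.mp h))
          have hDom : ((32 ≤ c.toNat ∧ c.toNat ≤ 126 ∨ c.toNat = 9) ∨ c.toNat = 10) ∨ c.toNat = 13 := by
            simpa [pvDomChar, Bool.or_eq_true, Bool.and_eq_true, decide_eq_true_eq] using hd
          have hiff : ∀ (d : Char), (c == d) = decide (c.toNat = d.toNat) := by
            intro d
            by_cases h : c = d
            · subst h; simp
            · have : c.toNat ≠ d.toNat := fun he => h (Char.ext (UInt32.toNat_inj.mp he))
              simp [h, this]
          simp only [PySem.Chars.isspace, pvSep, hiff]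
          have e1 : (' ' : Char).toNat = 32 := rfl
          have e2 : ('\t' : Char).toNat = 9 := rfl
          have e3 : ('\n' : Char).toNat = 10 := rfl
          have e4 : ('\r' : Char).toNat = 13 := rfl
          have e5 : (Char.ofNat 11).toNat = 11 := rfl
          have e6 : (Char.ofNat 12).toNat = 12 := rfl
          have e7 : ('.' : Char).toNat = 46 := rfl
          have e8 : (',' : Char).toNat = 44 := rfl
          have e9 : ('(' : Char).toNat = 40 := rfl
          have e10 : (')' : Char).toNat = 41 := rfl
          rw [e1, e2, e3, e4, e5, e6, e7, e8, e9, e10]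
          rw [Bool.eq_iff_iff]
          simp only [Bool.or_eq_true, Bool.and_eq_true, decide_eq_true_eq]
          constructor <;> intro h <;> omega

theorem pv_sep_clean (c : Char) (hs : pvSep c = false) : pvClean c = c := by
  have h1 : c ≠ '.' := fun h => by subst h; exact (by decide : ¬ (pvSep '.' = false)) hs
  have h2 : c ≠ ',' := fun h => by subst h; exact (by decide : ¬ (pvSep ',' = false)) hs
  have h3 : c ≠ '(' := fun h => by subst h; exact (by decide : ¬ (pvSep '(' = false)) hs
  have h4 : c ≠ ')' := fun h => by subst h; exact (by decide : ¬ (pvSep ')' = false)) hs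
  simp [pvClean, h1, h2, h3, h4]

theorem pv_go_tok (cs : List Char) (hd : ∀ c ∈ cs, pvDomChar c = true) :
    ∀ (cur : List Char) (acc : List (List Char)),
    PySem.Chars.split₀.go (cs.map pvClean) cur.reverse acc
      = acc.reverse ++ pvTokGo cs [] cur := by
  induction cs with
  | nil =>
    intro cur acc
    by_cases h : cur.isEmpty
    · simp [PySem.Chars.split₀.go, pvTokGo, h]
    · simp [PySem.Chars.split₀.go, pvTokGo, h]
  | cons c rest ih =>
    intro cur acc
    have hdc : pvDomChar c = true := hd c (by simp)
    have ihr := ih (fun x hx => hd x (by simp [hx]))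
    have hsp : PySem.Chars.isspace (pvClean c) = pvSep c := pv_isspace_clean c hdc
    by_cases hs : pvSep c
    · by_cases h : cur.isEmpty
      · have hce : cur = [] := by simpa [List.isEmpty_iff] using h
        subst hce
        simp only [List.map_cons, PySem.Chars.split₀.go, hsp, hs, List.reverse_nil,
          List.isEmpty_nil, if_pos, pvTokGo]
        simpa using ihr [] acc
      · simp only [List.map_cons, PySem.Chars.split₀.go, hsp, hs, List.isEmpty_reverse, h,
          Bool.false_eq_true, if_pos, if_neg, not_false_iff, List.reverse_reverse]
        have h2 := ihr [] (cur :: acc)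
        simp only [List.reverse_nil] at h2
        rw [h2]
        simp only [pvTokGo, hs, h, Bool.false_eq_true, if_pos, if_neg, not_false_iff,
          List.nil_append]
        rw [pvTokGo_acc rest [cur] []]
        simp [List.append_assoc]
    · have hsf : pvSep c = false := by simpa using hs
      have hcl : pvClean c = c := pv_sep_clean c hsf
      have hiss : PySem.Chars.isspace c = false := by rw [hcl] at hsp; rw [hsp, hsf]
      simp only [List.map_cons, PySem.Chars.split₀.go, hcl, hiss, Bool.false_eq_true,
        if_neg, not_false_iff]
      have hrw : c :: cur.reverse = (cur ++ [c]).reverse := by simp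
      rw [hrw, ihr (cur ++ [c]) acc]
      simp only [pvTokGo, hsf, Bool.false_eq_true, if_neg, not_false_iff]

theorem pv_tokens_eq (pin : String) (hd : pvDomStr pin = true) :
    pvTokens pin = PySem.Str.split₀ (pvCleaned pin) := by
  have hall : ∀ c ∈ pin.toList, pvDomChar c = true := by
    simpa [pvDomStr, List.all_eq_true] using hd
  have := pv_go_tok pin.toList hall [] []
  simp only [List.reverse_nil, List.nil_append] at this
  simp [PySem.Str.split₀, pvTokens, PySem.Chars.split₀, pv_toList_cleaned, this]

theorem pv_words_shape (pin : String) (h : 2 ≤ (PySem.Chars.split₀ (pin.toList.map pvClean)).length) :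
    ∃ p n rest, PySem.Str.split₀ (pvCleaned pin) = p :: n :: rest := by
  have hlen : (PySem.Str.split₀ (pvCleaned pin)).length
      = (PySem.Chars.split₀ (pin.toList.map pvClean)).length := by
    simp [PySem.Str.split₀, pv_toList_cleaned]
  match hws : PySem.Str.split₀ (pvCleaned pin) with
  | [] => rw [hws] at hlen; simp only [List.length_nil] at hlen; omega
  | [x] => rw [hws] at hlen; simp only [List.length_cons, List.length_nil] at hlen; omega
  | p :: n :: rest => exact ⟨p, n, rest, rfl⟩

-- a one-char token determines its string
theorem pv_string_of_char (p : String) (c : Char) (hc : p.toList = [c]) (d : Char)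
    (hd : c.toNat = d.toNat) (q : String) (hq : q.toList = [d]) : p = q := by
  have hcd : c = d := Char.ext (UInt32.toNat_inj.mp hd)
  exact String.toList_inj.mp (by rw [hc, hcd, hq])

-- ===== per-pin step lemmas: A's branch chain = append of B's pvRename =====
theorem pv_step_dff (pins : List String) (pin : String) (hd : pvDomStr pin = true)
    (h : 2 ≤ (PySem.Chars.split₀ (pin.toList.map pvClean)).length) :
    (match extract_pin_and_net pin with
      | some (p, n) =>
        if p = "d" then pins ++ [".D(" ++ n ++ ")"]
        else if p = "o" then pins ++ [".Q(" ++ n ++ ")"]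
        else if p = "ck" then pins ++ [".CK(clk)"]
        else pins
      | none => pins)
    = pins ++ (pvRename none pin).toList := by
  obtain ⟨p, n, rest, hws⟩ := pv_words_shape pin h
  have htok : pvTokens pin = p :: n :: rest := by rw [pv_tokens_eq pin hd, hws]
  rw [pv_extract_eq]
  unfold pvRename
  rw [htok, hws]
  by_cases h1 : p = "d"
  · subst h1; simp
  · by_cases h2 : p = "o"
    · subst h2; simp
    · by_cases h3 : p = "ck"
      · subst h3; simp
      · simp [h1, h2, h3]

theorem pv_renameB_eval (r : List String) (pin p n : String) (rest : List String)
    (htok : pvTokens pin = p :: n :: rest) :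
    pvRename (some r) pin =
      (if p = "o" then some (".ZN(" ++ n ++ ")")
      else
        let k : Int := if p.toList.length = 1 then ((p.toList.headD ' ').toNat : Int) - 97 else -1
        if 0 ≤ k ∧ k < (r.length : Int) then
          some ("." ++ ((PySem.List.pyGet? r k).getD "") ++ "(" ++ n ++ ")")
        else some (PySem.Str.stripChars pin ",")) := by
  unfold pvRename
  rw [htok]

-- if p is not among the first letters of the row (nor handled earlier), B's computed
-- index k falls outside the row and B takes the default branch
theorem pv_k_out (r : List String) (hr : r.length ≤ 4) (p : String)
    (h1 : p ≠ "a") (h2 : 2 ≤ r.length → p ≠ "b") (h3 : 3 ≤ r.length → p ≠ "c")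
    (h4 : 4 ≤ r.length → p ≠ "d") :
    ¬ (0 ≤ (if p.toList.length = 1 then ((p.toList.headD ' ').toNat : Int) - 97 else -1) ∧
       (if p.toList.length = 1 then ((p.toList.headD ' ').toNat : Int) - 97 else -1) < (r.length : Int)) := by
  rintro ⟨hk0, hk1⟩
  by_cases hl : p.toList.length = 1
  · obtain ⟨c, hc⟩ := List.length_eq_one_iff.mp hl
    rw [if_pos hl, hc] at hk0 hk1
    simp only [List.headD_cons] at hk0 hk1
    have hcase : c.toNat = 97 ∨ (c.toNat = 98 ∧ 2 ≤ r.length) ∨ (c.toNat = 99 ∧ 3 ≤ r.length)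
        ∨ (c.toNat = 100 ∧ 4 ≤ r.length) := by omega
    rcases hcase with h | ⟨h, hlen⟩ | ⟨h, hlen⟩ | ⟨h, hlen⟩
    · exact h1 (pv_string_of_char p c hc 'a' (by rw [h]; rfl) "a" rfl)
    · exact h2 hlen (pv_string_of_char p c hc 'b' (by rw [h]; rfl) "b" rfl)
    · exact h3 hlen (pv_string_of_char p c hc 'c' (by rw [h]; rfl) "c" rfl)
    · exact h4 hlen (pv_string_of_char p c hc 'd' (by rw [h]; rfl) "d" rfl)
  · rw [if_neg hl] at hk0
    omega

theorem pv_step_xoi21 (pins : List String) (pin : String) (hd : pvDomStr pin = true)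
    (h : 2 ≤ (PySem.Chars.split₀ (pin.toList.map pvClean)).length) :
    (match extract_pin_and_net pin with
      | some (p, n) =>
        if p = "a" then pins ++ [".A(" ++ n ++ ")"]
        else if p = "b" then pins ++ [".B1(" ++ n ++ ")"]
        else if p = "c" then pins ++ [".B2(" ++ n ++ ")"]
        else if p = "o" then pins ++ [".ZN(" ++ n ++ ")"]
        else pins ++ [PySem.Str.stripChars pin ","]
      | none => pins)
    = pins ++ (pvRename (some ["A", "B1", "B2"]) pin).toList := by
  obtain ⟨p, n, rest, hws⟩ := pv_words_shape pin h
  have htok : pvTokens pin = p :: n :: rest := by rw [pv_tokens_eq pin hd, hws]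
  rw [pv_extract_eq, pv_renameB_eval _ _ _ _ _ htok, hws]
  by_cases h0 : p = "o"
  · subst h0; simp
  · by_cases h1 : p = "a"
    · subst h1; simp [PySem.List.pyGet?, PySem.List.pyIdx?]
    · by_cases h2 : p = "b"
      · subst h2; simp [PySem.List.pyGet?, PySem.List.pyIdx?]
      · by_cases h3 : p = "c"
        · subst h3; simp [PySem.List.pyGet?, PySem.List.pyIdx?]
        · have hk := pv_k_out ["A", "B1", "B2"] (by simp) p h1 (fun _ => h2) (fun _ => h3)
            (fun hlen => by simp at hlen)
          rw [if_neg h0, if_neg hk]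
          simp [h0, h1, h2, h3]

theorem pv_step_xoi22 (pins : List String) (pin : String) (hd : pvDomStr pin = true)
    (h : 2 ≤ (PySem.Chars.split₀ (pin.toList.map pvClean)).length) :
    (match extract_pin_and_net pin with
      | some (p, n) =>
        if p = "a" then pins ++ [".A1(" ++ n ++ ")"]
        else if p = "b" then pins ++ [".A2(" ++ n ++ ")"]
        else if p = "c" then pins ++ [".B1(" ++ n ++ ")"]
        else if p = "d" then pins ++ [".B2(" ++ n ++ ")"]
        else if p = "o" then pins ++ [".ZN(" ++ n ++ ")"]
        else pins ++ [PySem.Str.stripChars pin ","]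
      | none => pins)
    = pins ++ (pvRename (some ["A1", "A2", "B1", "B2"]) pin).toList := by
  obtain ⟨p, n, rest, hws⟩ := pv_words_shape pin h
  have htok : pvTokens pin = p :: n :: rest := by rw [pv_tokens_eq pin hd, hws]
  rw [pv_extract_eq, pv_renameB_eval _ _ _ _ _ htok, hws]
  by_cases h0 : p = "o"
  · subst h0; simp
  · by_cases h1 : p = "a"
    · subst h1; simp [PySem.List.pyGet?, PySem.List.pyIdx?]
    · by_cases h2 : p = "b"
      · subst h2; simp [PySem.List.pyGet?, PySem.List.pyIdx?]
      · by_cases h3 : p = "c"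
        · subst h3; simp [PySem.List.pyGet?, PySem.List.pyIdx?]
        · by_cases h4 : p = "d"
          · subst h4; simp [PySem.List.pyGet?, PySem.List.pyIdx?]
          · have hk := pv_k_out ["A1", "A2", "B1", "B2"] (by simp) p h1 (fun _ => h2)
              (fun _ => h3) (fun _ => h4)
            rw [if_neg h0, if_neg hk]
            simp [h0, h1, h2, h3, h4]

theorem pv_step_inv (pins : List String) (pin : String) (hd : pvDomStr pin = true)
    (h : 2 ≤ (PySem.Chars.split₀ (pin.toList.map pvClean)).length) :
    (match extract_pin_and_net pin with
      | some (p, n) =>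
        if p = "a" then pins ++ [".A(" ++ n ++ ")"]
        else if p = "o" then pins ++ [".ZN(" ++ n ++ ")"]
        else pins ++ [PySem.Str.stripChars pin ","]
      | none => pins)
    = pins ++ (pvRename (some ["A"]) pin).toList := by
  obtain ⟨p, n, rest, hws⟩ := pv_words_shape pin h
  have htok : pvTokens pin = p :: n :: rest := by rw [pv_tokens_eq pin hd, hws]
  rw [pv_extract_eq, pv_renameB_eval _ _ _ _ _ htok, hws]
  by_cases h0 : p = "o"
  · subst h0; simp
  · by_cases h1 : p = "a"
    · subst h1; simp [PySem.List.pyGet?, PySem.List.pyIdx?]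
    · have hk := pv_k_out ["A"] (by simp) p h1 (fun hlen => by simp at hlen)
        (fun hlen => by simp at hlen) (fun hlen => by simp at hlen)
      rw [if_neg h0, if_neg hk]
      simp [h0, h1]

theorem pv_step_other (pins : List String) (pin : String) (hd : pvDomStr pin = true)
    (h : 2 ≤ (PySem.Chars.split₀ (pin.toList.map pvClean)).length) :
    (match extract_pin_and_net pin with
      | some (p, n) =>
        if p = "a" then pins ++ [".A1(" ++ n ++ ")"]
        else if p = "b" then pins ++ [".A2(" ++ n ++ ")"]
        else if p = "c" then pins ++ [".A3(" ++ n ++ ")"]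
        else if p = "d" then pins ++ [".A4(" ++ n ++ ")"]
        else if p = "o" then pins ++ [".ZN(" ++ n ++ ")"]
        else pins ++ [PySem.Str.stripChars pin ","]
      | none => pins)
    = pins ++ (pvRename (some ["A1", "A2", "A3", "A4"]) pin).toList := by
  obtain ⟨p, n, rest, hws⟩ := pv_words_shape pin h
  have htok : pvTokens pin = p :: n :: rest := by rw [pv_tokens_eq pin hd, hws]
  rw [pv_extract_eq, pv_renameB_eval _ _ _ _ _ htok, hws]
  by_cases h0 : p = "o"
  · subst h0; simp
  · by_cases h1 : p = "a"
    · subst h1; simp [PySem.List.pyGet?, PySem.List.pyIdx?]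
    · by_cases h2 : p = "b"
      · subst h2; simp [PySem.List.pyGet?, PySem.List.pyIdx?]
      · by_cases h3 : p = "c"
        · subst h3; simp [PySem.List.pyGet?, PySem.List.pyIdx?]
        · by_cases h4 : p = "d"
          · subst h4; simp [PySem.List.pyGet?, PySem.List.pyIdx?]
          · have hk := pv_k_out ["A1", "A2", "A3", "A4"] (by simp) p h1 (fun _ => h2)
              (fun _ => h3) (fun _ => h4)
            rw [if_neg h0, if_neg hk]
            simp [h0, h1, h2, h3, h4]

-- a fold appending at most one element is the filtered map
theorem pv_foldl_filterMap (f : String → Option String) (l : List String) :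
    ∀ (init : List String),
    l.foldl (fun pins pin => pins ++ (f pin).toList) init = init ++ (l.map f).filterMap id := by
  induction l with
  | nil => intro init; simp
  | cons x xs ih =>
    intro init
    simp only [List.foldl_cons, List.map_cons, List.filterMap_cons]
    rw [ih]
    cases f x <;> simp

-- ===== VERDICT (by name: the statement is the Claim_ definition above) =====
theorem change_pin_name_spec : Claim_equal_change_pin_name := by
  intro pin_string cell_name hdom hpre
  have hdoms : ∀ pin ∈ pin_string, pvDomStr pin = true := by
    intro pin hmem
    have := (Bool.and_eq_true _ _).mp hdom |>.1
    exact (List.all_eq_true.mp this) pin hmem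
  unfold Spec_change_pin_name change_pin_name change_pin_name_alt
  by_cases h1 : pvGateType cell_name = "DFF"
  · simp only [h1, if_pos]
    rw [PySem.List.foldl_congr_mem _ _ _ _
      (fun acc pin hmem => pv_step_dff acc pin (hdoms pin hmem) (hpre pin hmem))]
    simpa using pv_foldl_filterMap (pvRename none) pin_string []
  · simp only [if_neg h1]
    by_cases h2 : pvGateType cell_name = "AOI21" ∨ pvGateType cell_name = "OAI21"
    · simp only [if_pos h2]
      rw [PySem.List.foldl_congr_mem _ _ _ _
        (fun acc pin hmem => pv_step_xoi21 acc pin (hdoms pin hmem) (hpre pin hmem))]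
      simpa using pv_foldl_filterMap (pvRename (some ["A", "B1", "B2"])) pin_string []
    · simp only [if_neg h2]
      by_cases h3 : pvGateType cell_name = "AOI22" ∨ pvGateType cell_name = "OAI22"
      · simp only [if_pos h3]
        rw [PySem.List.foldl_congr_mem _ _ _ _
          (fun acc pin hmem => pv_step_xoi22 acc pin (hdoms pin hmem) (hpre pin hmem))]
        simpa using pv_foldl_filterMap (pvRename (some ["A1", "A2", "B1", "B2"])) pin_string []
      · simp only [if_neg h3]
        by_cases h4 : PySem.Str.isIn (pvGateType cell_name) "INV" = true
        · simp only [if_pos h4]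
          rw [PySem.List.foldl_congr_mem _ _ _ _
            (fun acc pin hmem => pv_step_inv acc pin (hdoms pin hmem) (hpre pin hmem))]
          simpa using pv_foldl_filterMap (pvRename (some ["A"])) pin_string []
        · simp only [if_neg h4]
          rw [PySem.List.foldl_congr_mem _ _ _ _
            (fun acc pin hmem => pv_step_other acc pin (hdoms pin hmem) (hpre pin hmem))]
          simpa using pv_foldl_filterMap (pvRename (some ["A1", "A2", "A3", "A4"])) pin_string []
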